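-- pv_equiv track=rewrite | github.com/sue-zadeh/python-test | visa.py | solution
-- ===== SOURCE A (Python) =====
-- def solution(s):
--     # TODO: implement find_vowels_positions
--     vowel=['i','o','e','u','a','I','O','E','U','A']
--     vowelCont=[]
--     for i in range (len(s)):
--         char = s[i]
--         if char in vowel:
--          vowelCont.append(i)
--     return vowelCont
-- ===== SOURCE B (Python) =====
-- def solution(s):
--     out = []
--     for v in "aeiouAEIOU":
--         for i, c in enumerate(s):
--             if c == v:
--                 out.append(i)
--     return sorted(out)
-- ===== Notes on version B (the rewrite author's own statement) =====
-- stated objective: alternative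
-- what changed: Instead of one pass testing each character for membership in a ten-element vowel list, B makes one equality-scan pass per vowel collecting match positions and then sorts the concatenated index lists back into positional order.
import Mathlib
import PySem

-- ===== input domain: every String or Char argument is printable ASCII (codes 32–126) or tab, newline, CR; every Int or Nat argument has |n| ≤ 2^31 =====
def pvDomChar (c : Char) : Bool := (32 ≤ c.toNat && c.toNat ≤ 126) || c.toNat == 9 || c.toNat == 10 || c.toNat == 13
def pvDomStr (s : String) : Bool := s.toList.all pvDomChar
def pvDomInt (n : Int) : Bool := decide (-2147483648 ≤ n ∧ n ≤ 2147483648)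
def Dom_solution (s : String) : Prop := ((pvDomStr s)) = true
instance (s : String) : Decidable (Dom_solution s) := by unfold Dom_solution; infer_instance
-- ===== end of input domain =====

-- B replaces A's single membership-test pass by one equality-scan pass per vowel
-- followed by sorting the concatenated index lists back into positional order (alternative).

-- ===== PORT A =====
def solution (s : String) : List Int :=
  let vowel : List Char := ['i','o','e','u','a','I','O','E','U','A']
  (PySem.List.pyRange 0 (PySem.Str.len s) 1).foldl
    (fun vowelCont i =>
      match PySem.Str.pyGet? s i with
      | some char => if vowel.contains char then vowelCont ++ [i] else vowelCont
      | none => vowelCont)   -- unreachable: i ∈ range(len(s))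
    []

-- ===== PORT B =====
def solution_alt (s : String) : List Int :=
  let out : List Int :=
    "aeiouAEIOU".toList.foldl
      (fun out v =>
        (PySem.List.enumerate s.toList 0).foldl
          (fun out p => if p.2 == v then out ++ [p.1] else out) out)
      []
  PySem.List.sorted out (fun x => x) false

-- ===== PRECONDITION & SPEC =====
def Spec_solution (s : String) (out : List Int) : Prop := out = solution_alt s
instance (s : String) (out : List Int) : Decidable (Spec_solution s out) := by unfold Spec_solution; infer_instance

-- ===== CLAIM (what is proved, stated in full; the proofs are below) =====
def Claim_equal_solution : Prop := ∀ (s : String), Dom_solution s → Spec_solution s (solution s)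

-- ===== LEMMAS AND PROOFS =====

-- the two vowel collections contain the same characters
theorem vowels_same (c : Char) :
    (['i','o','e','u','a','I','O','E','U','A'] : List Char).contains c
      = "aeiouAEIOU".toList.contains c := by
  simp only [List.contains_eq_mem, decide_eq_decide]
  constructor <;> intro h <;> simp_all <;> tauto

-- distributing a cons under flatMap when exactly one element of a Nodup list matches
theorem flatMap_if_cons {α β : Type} [DecidableEq β] (a : α) (g : β → List α) (c : β) :
    ∀ (vs : List β), vs.Nodup → c ∈ vs →
    (vs.flatMap (fun v => if c == v then a :: g v else g v)).Perm (a :: vs.flatMap g) := by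
  intro vs
  induction vs with
  | nil => intro _ h; simp at h
  | cons v t ih =>
    intro hnd hc
    rcases List.nodup_cons.mp hnd with ⟨hv, hndt⟩
    by_cases hcv : c = v
    · subst hcv
      have : t.flatMap (fun v => if c == v then a :: g v else g v) = t.flatMap g := by
        apply List.flatMap_congr
        intro x hx
        have : c ≠ x := fun h => hv (h ▸ hx)
        simp [this]
      rw [List.flatMap_cons, this, List.flatMap_cons]
      simp
    · have hct : c ∈ t := by
        rcases List.mem_cons.mp hc with h | h
        · exact absurd h hcv
        · exact h
      have hperm := ih hndt hct
      have hne : ¬ (c == v) = true := by simp [hcv]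
      rw [List.flatMap_cons, List.flatMap_cons, if_neg hne]
      exact (hperm.append_left (g v)).trans List.perm_middle

-- the per-vowel equality passes, concatenated, are a permutation of the membership pass
theorem flatMap_filter_perm {α β : Type} [DecidableEq β] (vs : List β) (hvs : vs.Nodup) :
    ∀ (l : List (α × β)),
    (vs.flatMap (fun v => (l.filter (fun p => p.2 == v)).map (·.1))).Perm
      ((l.filter (fun p => vs.contains p.2)).map (·.1)) := by
  intro l
  induction l with
  | nil => simp
  | cons p t ih =>
    by_cases hm : p.2 ∈ vs
    · have hL : vs.flatMap (fun v => ((p :: t).filter (fun q => q.2 == v)).map (·.1))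
          = vs.flatMap (fun v =>
              if p.2 == v then p.1 :: (t.filter (fun q => q.2 == v)).map (·.1)
              else (t.filter (fun q => q.2 == v)).map (·.1)) := by
        apply List.flatMap_congr
        intro v _
        by_cases h : p.2 = v <;> simp [h]
      rw [hL]
      have h1 := flatMap_if_cons p.1 (fun v => (t.filter (fun q => q.2 == v)).map (·.1)) p.2 vs hvs hm
      have hR : ((p :: t).filter (fun q => vs.contains q.2)).map (·.1)
          = p.1 :: (t.filter (fun q => vs.contains q.2)).map (·.1) := by
        simp [hm]
      rw [hR]
      exact h1.trans (List.Perm.cons p.1 ih)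
    · have hL : vs.flatMap (fun v => ((p :: t).filter (fun q => q.2 == v)).map (·.1))
          = vs.flatMap (fun v => (t.filter (fun q => q.2 == v)).map (·.1)) := by
        apply List.flatMap_congr
        intro v hv
        have : p.2 ≠ v := fun h => hm (h ▸ hv)
        simp [this]
      have hR : ((p :: t).filter (fun q => vs.contains q.2)).map (·.1)
          = (t.filter (fun q => vs.contains q.2)).map (·.1) := by
        simp [hm]
      rw [hL, hR]; exact ih

-- A reduces to filtering the enumerate pairs by vowel membership and projecting the index
theorem solutionA_eq (s : String) :
    solution s
      = ((PySem.List.enumerate s.toList 0).filter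
          (fun p => "aeiouAEIOU".toList.contains p.2)).map (·.1) := by
  classical
  set l := s.toList with hl
  unfold solution
  rw [PySem.Str.len_eq, ← hl]
  have hcong : (PySem.List.pyRange 0 (l.length : Int) 1).foldl
      (fun vowelCont i =>
        match PySem.Str.pyGet? s i with
        | some char => if (['i','o','e','u','a','I','O','E','U','A'] : List Char).contains char then vowelCont ++ [i] else vowelCont
        | none => vowelCont) []
      = (PySem.List.pyRange 0 (l.length : Int) 1).foldl
      (fun vowelCont i =>
        if "aeiouAEIOU".toList.contains (PySem.List.pyGetD l i ' ') then vowelCont ++ [i] else vowelCont) [] := by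
    apply PySem.List.foldl_congr_mem
    intro acc i hi
    rw [PySem.List.mem_pyRange_one] at hi
    have h0 : 0 ≤ i := hi.1
    have h1 : i.toNat < l.length := by omega
    have hg : PySem.Str.pyGet? s i = some (PySem.List.pyGetD l i ' ') := by
      rw [show i = ((i.toNat : Nat) : Int) from (Int.toNat_of_nonneg h0).symm,
          PySem.Str.pyGet?_natCast, PySem.List.pyGetD_natCast, ← hl]
      simp [h1]
    rw [hg]
    simp only [vowels_same]
  rw [hcong, PySem.List.foldl_append_if_eq_filter]
  rw [PySem.List.enumerate_eq_map_pyRange l ' ', List.filter_map, List.map_map]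
  simp [Function.comp_def]

-- B's nested foldl builds exactly the per-vowel concatenation, then sorts it
theorem solutionB_eq (s : String) :
    solution_alt s
      = PySem.List.sorted
          ("aeiouAEIOU".toList.flatMap
            (fun v => ((PySem.List.enumerate s.toList 0).filter (fun p => p.2 == v)).map (·.1)))
          (fun x => x) false := by
  unfold solution_alt
  have hinner : ∀ (v : Char) (acc : List Int),
      (PySem.List.enumerate s.toList 0).foldl
        (fun out p => if p.2 == v then out ++ [p.1] else out) acc
      = acc ++ ((PySem.List.enumerate s.toList 0).filter (fun p => p.2 == v)).map (·.1) := by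
    intro v acc
    exact PySem.List.foldl_append_if (fun (p : Int × Char) => p.2 == v) (fun (p : Int × Char) => p.1) _ acc
  have : "aeiouAEIOU".toList.foldl
      (fun out v =>
        (PySem.List.enumerate s.toList 0).foldl
          (fun out p => if p.2 == v then out ++ [p.1] else out) out) []
      = "aeiouAEIOU".toList.foldl
      (fun out v =>
        out ++ ((PySem.List.enumerate s.toList 0).filter (fun p => p.2 == v)).map (·.1)) [] := by
    apply PySem.List.foldl_congr_mem
    intro acc v _
    exact hinner v acc
  rw [this, PySem.List.foldl_append_eq_flatMap]
  simp

-- the membership-pass index list is strictly increasing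
theorem target_pairwise (s : String) :
    (((PySem.List.enumerate s.toList 0).filter
        (fun p => "aeiouAEIOU".toList.contains p.2)).map (·.1)).Pairwise (· < ·) := by
  rw [List.pairwise_map]
  exact (PySem.List.pairwise_lt_enumerate s.toList 0).filter _

theorem both_eq (s : String) : solution s = solution_alt s := by
  rw [solutionA_eq, solutionB_eq]
  have hnd : ("aeiouAEIOU".toList : List Char).Nodup := by decide
  symm
  apply PySem.List.sorted_eq_of_perm_of_pairwise_lt
  · exact (flatMap_filter_perm "aeiouAEIOU".toList hnd (PySem.List.enumerate s.toList 0)).symm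
  · exact target_pairwise s

-- ===== VERDICT (by name: the statement is the Claim_ definition above) =====
theorem solution_spec : Claim_equal_solution := by
  intro s _
  unfold Spec_solution
  exact both_eq s
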